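-- pv_equiv track=rewrite | github.com/pabloschwarzenberg/grader | hito2_ej3/hito2_ej3_960d63b0f3b8b771d7eaf6c91765f810.py | encontrar_substrings_unicos
-- ===== SOURCE A (Python) =====
-- def encontrar_substrings_unicos(cadena, n):
--     substrings = set()  # Conjunto para almacenar los substrings únicos
--     duplicados = set()  # Conjunto para almacenar los substrings duplicados
--
--     for i in range(len(cadena) - n + 1):
--         substring = cadena[i:i+n]  # Obtener el substring de longitud n
--
--         if substring in substrings:
--             duplicados.add(substring)  # Agregar el substring a los duplicados
--         else:
--             substrings.add(substring)  # Agregar el substring a los únicos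
--
--     substrings_unicos = substrings - duplicados  # Obtener los substrings únicos
--
--     return substrings_unicos
-- ===== SOURCE B (Python) =====
-- def encontrar_substrings_unicos(cadena, n):
--     subs = [cadena[i:i+n] for i in range(len(cadena) - n + 1)]
--     return {s for s in set(subs) if subs.count(s) == 1}
-- ===== Notes on version B (the rewrite author's own statement) =====
-- stated objective: alternative
-- what changed: Drops A's incremental seen/duplicates set bookkeeping and final set difference: B first materializes the list of all length-n window slices, then selects each distinct slice by a brute-force full-list count subs.count(s) == 1 (staged passes with a rescanning count, no state maintained during the window scan).
import Mathlib
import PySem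

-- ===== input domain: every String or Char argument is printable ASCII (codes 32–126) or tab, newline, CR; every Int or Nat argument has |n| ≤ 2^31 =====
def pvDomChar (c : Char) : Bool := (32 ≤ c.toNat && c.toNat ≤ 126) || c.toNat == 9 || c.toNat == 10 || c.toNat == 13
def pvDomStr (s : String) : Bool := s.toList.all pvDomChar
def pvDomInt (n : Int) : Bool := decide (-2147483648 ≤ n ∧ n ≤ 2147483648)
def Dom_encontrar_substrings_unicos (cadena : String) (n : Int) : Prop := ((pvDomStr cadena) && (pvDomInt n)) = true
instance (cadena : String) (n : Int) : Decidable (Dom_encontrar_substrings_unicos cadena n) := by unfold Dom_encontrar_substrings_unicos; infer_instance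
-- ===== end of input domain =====

-- B replaces A's single scan with incremental seen/duplicates sets and a final set
-- difference by two staged passes: materialize all window slices, then keep those whose
-- brute-force full-list count is exactly 1 (alternative decomposition, not faster).

-- ===== PORT A =====
def encontrar_substrings_unicos (cadena : String) (n : Int) : List String :=
  let st := (PySem.List.pyRange 0 (PySem.Str.len cadena - n + 1) 1).foldl
    (fun (st : PySem.Set String × PySem.Set String) i =>
      let substring := PySem.Str.slice cadena (some i) (some (i + n))
      if PySem.Set.contains st.1 substring then
        (st.1, PySem.Set.add st.2 substring)
      else
        (PySem.Set.add st.1 substring, st.2))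
    (PySem.Set.empty, PySem.Set.empty)
  PySem.Set.diff st.1 st.2

-- ===== PORT B =====
def encontrar_substrings_unicos_alt (cadena : String) (n : Int) : List String :=
  let subs := (PySem.List.pyRange 0 (PySem.Str.len cadena - n + 1) 1).map
    (fun i => PySem.Str.slice cadena (some i) (some (i + n)))
  PySem.Set.ofList ((PySem.Set.ofList subs).filter (fun s => PySem.List.count subs s == 1))

-- ===== PRECONDITION & SPEC =====
def Spec_encontrar_substrings_unicos (cadena : String) (n : Int) (out : List String) : Prop := out = encontrar_substrings_unicos_alt cadena n
instance (cadena : String) (n : Int) (out : List String) : Decidable (Spec_encontrar_substrings_unicos cadena n out) := by unfold Spec_encontrar_substrings_unicos; infer_instance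

-- ===== CLAIM (what is proved, stated in full; the proofs are below) =====
def Claim_equal_encontrar_substrings_unicos : Prop := ∀ (cadena : String) (n : Int), Dom_encontrar_substrings_unicos cadena n → Spec_encontrar_substrings_unicos cadena n (encontrar_substrings_unicos cadena n)

-- ===== LEMMAS AND PROOFS =====

-- A's loop body, as a step function on the (seen, duplicates) pair
def stepA (st : PySem.Set String × PySem.Set String) (x : String) :
    PySem.Set String × PySem.Set String :=
  if PySem.Set.contains st.1 x then (st.1, PySem.Set.add st.2 x)
  else (PySem.Set.add st.1 x, st.2)

theorem foldA_fst (l : List String) (s d : PySem.Set String) :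
    (l.foldl stepA (s, d)).1 = l.foldl PySem.Set.add s := by
  induction l generalizing s d with
  | nil => rfl
  | cons a l ih =>
    simp only [List.foldl_cons, stepA]
    split_ifs with h
    · have ha : a ∈ s := by simpa [PySem.Set.contains_iff] using h
      simp [ih, PySem.Set.add, ha]
    · have ha : a ∉ s := by simpa [PySem.Set.contains_iff] using h
      simp [ih, PySem.Set.add, ha]

theorem foldA_snd_mem (l : List String) (s d : PySem.Set String) (x : String) :
    x ∈ (l.foldl stepA (s, d)).2 ↔ x ∈ d ∨ (x ∈ l ∧ (x ∈ s ∨ 2 ≤ l.count x)) := by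
  induction l generalizing s d with
  | nil => simp
  | cons a l ih =>
    simp only [List.foldl_cons, stepA]
    split_ifs with h
    · have ha : a ∈ s := by simpa [PySem.Set.contains_iff] using h
      rw [ih]
      by_cases hxa : x = a
      · subst hxa
        have hcnt : x ∈ l ↔ 0 < l.count x := List.count_pos_iff.symm
        by_cases hd : x ∈ d <;> by_cases hl : x ∈ l <;>
          simp [PySem.Set.mem_add, List.count_cons, hd, hl, ha, hcnt] <;> omega
      · have hax : ¬ a = x := fun he => hxa he.symm
        by_cases hd : x ∈ d <;>
          simp [PySem.Set.mem_add, List.count_cons, hd, hxa, hax]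
    · have ha : a ∉ s := by simpa [PySem.Set.contains_iff] using h
      rw [ih]
      by_cases hxa : x = a
      · subst hxa
        have hcnt : x ∈ l ↔ 0 < l.count x := List.count_pos_iff.symm
        by_cases hd : x ∈ d <;> by_cases hl : x ∈ l <;>
          simp [PySem.Set.mem_add, List.count_cons, hd, hl, ha, hcnt] <;> omega
      · have hax : ¬ a = x := fun he => hxa he.symm
        by_cases hd : x ∈ d <;>
          simp [PySem.Set.mem_add, List.count_cons, hd, hxa, hax, ha]

-- set(xs) commutes with filtering by a pointwise predicate
theorem ofList_filter (p : String → Bool) (l : List String) :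
    PySem.Set.ofList (l.filter p) = (PySem.Set.ofList l).filter p := by
  induction l using List.reverseRecOn with
  | nil => rfl
  | append_singleton xs x ih =>
    rw [List.filter_append, PySem.Set.ofList_append_singleton, List.filter_singleton]
    by_cases hm : x ∈ xs
    · by_cases hp : p x = true
      · simp only [hp, cond_true]
        rw [PySem.Set.ofList_append_singleton, ih, PySem.Set.add, PySem.Set.add]
        simp [hm, hp, PySem.Set.mem_ofList]
      · have hp' : p x = false := Bool.eq_false_iff.mpr hp
        simp only [hp', cond_false, List.append_nil]
        rw [ih, PySem.Set.add]
        simp [hm]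
    · by_cases hp : p x = true
      · simp only [hp, cond_true]
        rw [PySem.Set.ofList_append_singleton, ih, PySem.Set.add, PySem.Set.add]
        simp [hm, hp, PySem.Set.mem_ofList, List.filter_append]
      · have hp' : p x = false := Bool.eq_false_iff.mpr hp
        simp only [hp', cond_false, List.append_nil]
        rw [ih, PySem.Set.add]
        simp [hm, hp', List.filter_append]

theorem key (l : List String) :
    PySem.Set.diff ((l.foldl stepA (PySem.Set.empty, PySem.Set.empty)).1)
      ((l.foldl stepA (PySem.Set.empty, PySem.Set.empty)).2)
    = PySem.Set.ofList (l.filter (fun s => PySem.List.count l s == 1)) := by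
  rw [ofList_filter, foldA_fst,
    show (PySem.Set.empty : PySem.Set String) = [] from rfl, ← PySem.Set.ofList_eq_foldl]
  simp only [PySem.Set.diff, PySem.List.count]
  apply List.filter_congr
  intro x hx
  have hxl : x ∈ l := (PySem.Set.mem_ofList l x).1 hx
  have hpos : 0 < l.count x := List.count_pos_iff.2 hxl
  by_cases h2 : 2 ≤ l.count x
  · have hmem : x ∈ (l.foldl stepA (([] : PySem.Set String), ([] : PySem.Set String))).2 := by
      rw [foldA_snd_mem]; exact Or.inr ⟨hxl, Or.inr h2⟩
    have hcont : ((l.foldl stepA (([] : PySem.Set String), ([] : PySem.Set String))).2).contains x = true :=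
      (PySem.Set.contains_iff _ x).mpr hmem
    simp only [hcont, Bool.not_true]
    symm
    simp only [beq_eq_false_iff_ne, ne_eq]
    omega
  · have hnmem : x ∉ (l.foldl stepA (([] : PySem.Set String), ([] : PySem.Set String))).2 := by
      rw [foldA_snd_mem]
      simp [hxl]
      omega
    have hcont : ((l.foldl stepA (([] : PySem.Set String), ([] : PySem.Set String))).2).contains x = false :=
      Bool.eq_false_iff.mpr (fun hc => hnmem ((PySem.Set.contains_iff _ x).mp hc))
    simp only [hcont, Bool.not_false]
    symm
    simp only [beq_iff_eq]
    omega

-- ===== VERDICT (by name: the statement is the Claim_ definition above) =====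
theorem encontrar_substrings_unicos_spec : Claim_equal_encontrar_substrings_unicos := by
  intro cadena n _
  unfold Spec_encontrar_substrings_unicos encontrar_substrings_unicos encontrar_substrings_unicos_alt
  simp only []
  rw [show (fun (st : PySem.Set String × PySem.Set String) i =>
        let substring := PySem.Str.slice cadena (some i) (some (i + n))
        if PySem.Set.contains st.1 substring then (st.1, PySem.Set.add st.2 substring)
        else (PySem.Set.add st.1 substring, st.2))
      = fun st i => stepA st (PySem.Str.slice cadena (some i) (some (i + n))) from rfl]
  rw [← List.foldl_map (f := fun i => PySem.Str.slice cadena (some i) (some (i + n))) (g := stepA)]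
  rw [key, ofList_filter,
    PySem.Set.ofList_eq_self_of_nodup _ (List.Sublist.nodup List.filter_sublist (PySem.Set.nodup_ofList _))]
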